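-- pv_equiv track=rewrite | github.com/MacHu-GWU/Archives | util/STRING/formatmaster.py | person_name_formatter
-- ===== SOURCE A (Python) =====
-- def person_name_formatter(text):
--     """将字符串转换为首字母大写, 其他字母小写的, 非严格英文句子格式。单词之间的空格会被标准化为长度1。
--     注意: 一些国家, 名字之类的本应大写的单词可能会被转化成小写。
--     """
--     text = text.strip()
--     if len(text) == 0: # 如果是空字符串, 则依旧保留空字符串
--         return text
--     else:
--         text = text.lower()
--         # 按照空格拆分单词, 多个空格按一个空格对待
--         chunks = [chunk[0].upper() + chunk[1:] for chunk in text.split(" ") if len(chunk)>=1]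
--         return " ".join(chunks)
-- ===== SOURCE B (Python) =====
-- def person_name_formatter(text):
--     """Single-pass character state machine: capitalize the first char of each
--     space-separated word, collapse runs of spaces to one."""
--     s = text.strip()
--     if not s:
--         return s
--     out = []
--     new_word = True
--     for c in s.lower():
--         if c == " ":
--             new_word = True
--         else:
--             if new_word and out:
--                 out.append(" ")
--             out.append(c.upper() if new_word else c)
--             new_word = False
--     return "".join(out)
-- ===== Notes on version B (the rewrite author's own statement) =====
-- stated objective: alternative
-- what changed: Replaces A's strip/lower/space-split/filter/capitalize/join pipeline by a single left-to-right character state machine that emits output with a new-word flag, collapsing space runs and capitalizing word starts in one pass.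
import Mathlib
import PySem

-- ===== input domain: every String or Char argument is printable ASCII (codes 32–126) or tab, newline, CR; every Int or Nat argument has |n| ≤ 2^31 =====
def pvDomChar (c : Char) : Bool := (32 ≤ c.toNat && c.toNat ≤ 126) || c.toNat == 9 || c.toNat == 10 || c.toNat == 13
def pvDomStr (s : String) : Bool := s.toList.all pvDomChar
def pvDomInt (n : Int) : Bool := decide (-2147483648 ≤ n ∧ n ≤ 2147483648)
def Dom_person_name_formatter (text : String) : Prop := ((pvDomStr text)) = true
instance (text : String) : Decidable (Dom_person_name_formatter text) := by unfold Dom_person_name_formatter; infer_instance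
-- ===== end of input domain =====

-- B replaces A's split/comprehension/join pipeline by a single-pass character
-- state machine (objective: alternative decomposition, same cost).

-- ===== PORT A =====
-- chunk[0].upper() + chunk[1:]  (chunk is always nonempty where this is applied)
def pvCapA (chunk : List Char) : List Char :=
  match PySem.List.pyGet? chunk 0 with
  | some c => PySem.Chars.upperChar c :: PySem.List.slice chunk (some 1) none
  | none => []   -- unreachable: Python would raise IndexError on an empty chunk

def person_name_formatter (text : String) : String :=
  let t := PySem.Chars.strip text.toList
  if t.length = 0 then String.ofList t
  else
    String.ofList (PySem.Chars.join [' ']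
      ((((PySem.Chars.split? (PySem.Chars.lower t) [' ']).getD []).filter
          (fun ch => 1 ≤ ch.length)).map pvCapA))

-- ===== PORT B =====
-- one step of the state machine: state = (emitted output, new-word flag)
def pvStep (st : List Char × Bool) (c : Char) : List Char × Bool :=
  if c = ' ' then (st.1, true)
  else ((st.1 ++ (if st.2 ∧ st.1 ≠ [] then [' '] else [])) ++
          [if st.2 then PySem.Chars.upperChar c else c], false)

def person_name_formatter_alt (text : String) : String :=
  let s := PySem.Chars.strip text.toList
  if s = [] then ""
  else String.ofList ((PySem.Chars.lower s).foldl pvStep ([], true)).1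

-- ===== PRECONDITION & SPEC =====
def Spec_person_name_formatter (text : String) (out : String) : Prop := out = person_name_formatter_alt text
instance (text : String) (out : String) : Decidable (Spec_person_name_formatter text out) := by unfold Spec_person_name_formatter; infer_instance

-- ===== CLAIM (what is proved, stated in full; the proofs are below) =====
def Claim_equal_person_name_formatter : Prop := ∀ (text : String), Dom_person_name_formatter text → Spec_person_name_formatter text (person_name_formatter text)

-- ===== LEMMAS AND PROOFS =====

-- split on a single literal space, as a plain structural recursion
def pvSplitSp : List Char → List (List Char)
  | [] => [[]]
  | c :: r => if c = ' ' then [] :: pvSplitSp r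
              else (c :: (pvSplitSp r).headI) :: (pvSplitSp r).tail

lemma pvSplitSp_ne_nil (l : List Char) : pvSplitSp l ≠ [] := by
  cases l with
  | nil => simp [pvSplitSp]
  | cons c r => simp only [pvSplitSp]; split_ifs <;> simp

-- A's tail of the pipeline: filter nonempty chunks, capitalize, join with ' '
def pvR (ws : List (List Char)) : List Char :=
  PySem.Chars.join [' '] ((ws.filter (fun w => 1 ≤ w.length)).map pvCapA)

lemma pvCapA_cons (c : Char) (h : List Char) :
    pvCapA (c :: h) = PySem.Chars.upperChar c :: h := by
  have hg : PySem.List.pyGet? (c :: h) 0 = some c := by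
    simp [PySem.List.pyGet?, PySem.List.pyIdx?]
  have hs : PySem.List.slice (c :: h) (some 1) none = h := by
    rw [PySem.List.slice_from (c :: h) (by norm_num : (0:Int) ≤ 1)]
    simp
  rw [pvCapA, hg, hs]


lemma pvR_nil : pvR [] = [] := by simp [pvR, PySem.Chars.join_nil]

lemma pvR_cons_nil (t : List (List Char)) : pvR ([] :: t) = pvR t := by
  simp [pvR]

lemma pvR_cons_cons (c : Char) (h : List Char) (t : List (List Char)) :
    pvR ((c :: h) :: t) =
      (PySem.Chars.upperChar c :: h) ++ (if pvR t = [] then [] else ' ' :: pvR t) := by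
  have hful : ((c :: h) :: t).filter (fun w => 1 ≤ w.length)
      = (c :: h) :: t.filter (fun w => 1 ≤ w.length) := by simp
  unfold pvR
  rw [hful]
  rcases ht : t.filter (fun w => 1 ≤ w.length) with _ | ⟨w, ws⟩
  · simp [PySem.Chars.join_singleton, pvCapA_cons, ht, PySem.Chars.join_nil]
  · have hw : w ≠ [] := by
      have : w ∈ t.filter (fun w => 1 ≤ w.length) := by rw [ht]; exact List.mem_cons_self ..
      have := List.of_mem_filter this
      simp at this
      exact List.ne_nil_of_length_pos (by omega)
    have hjoin_ne : PySem.Chars.join [' '] (List.map pvCapA (w :: ws)) ≠ [] := by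
      rcases w with _ | ⟨a, b⟩
      · exact absurd rfl hw
      · rcases ws with _ | ⟨w2, ws2⟩
        · simp [PySem.Chars.join_singleton, pvCapA_cons]
        · rw [List.map_cons, List.map_cons, PySem.Chars.join_cons_cons, pvCapA_cons]
          simp
    rw [ht, List.map_cons, List.map_cons, PySem.Chars.join_cons_cons, pvCapA_cons]
    rw [List.map_cons] at hjoin_ne
    rw [if_neg hjoin_ne]
    simp

-- the machine run from a 'new word' state (L1) / a 'mid word' state (L2)
lemma pvMachine (cs : List Char) :
    (∀ acc : List Char,
      (cs.foldl pvStep (acc, true)).1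
        = acc ++ (if acc = [] ∨ pvR (pvSplitSp cs) = [] then pvR (pvSplitSp cs)
                  else ' ' :: pvR (pvSplitSp cs)))
    ∧
    (∀ acc : List Char, acc ≠ [] →
      (cs.foldl pvStep (acc, false)).1
        = (acc ++ (pvSplitSp cs).headI) ++
            (if pvR ((pvSplitSp cs).tail) = [] then [] else ' ' :: pvR ((pvSplitSp cs).tail))) := by
  induction cs with
  | nil =>
      constructor
      · intro acc
        simp [pvSplitSp, pvR_cons_nil, pvR_nil]
      · intro acc _
        simp [pvSplitSp, pvR_nil]
  | cons c r ih =>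
      obtain ⟨ih1, ih2⟩ := ih
      constructor
      · intro acc
        by_cases hc : c = ' '
        · subst hc
          rw [List.foldl_cons]
          have hstep : pvStep (acc, true) ' ' = (acc, true) := by simp [pvStep]
          rw [hstep, ih1 acc]
          simp [pvSplitSp, pvR_cons_nil]
        · rw [List.foldl_cons]
          have hstep : pvStep (acc, true) c
              = ((acc ++ (if acc ≠ [] then [' '] else [])) ++ [PySem.Chars.upperChar c], false) := by
            simp [pvStep, hc]
          rw [hstep]
          have hne : (acc ++ (if acc ≠ [] then [' '] else [])) ++ [PySem.Chars.upperChar c] ≠ [] := by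
            simp
          rw [ih2 _ hne]
          have hsp : pvSplitSp (c :: r)
              = (c :: (pvSplitSp r).headI) :: (pvSplitSp r).tail := by
            simp [pvSplitSp, hc]
          rw [hsp]
          have hcc := pvR_cons_cons c (pvSplitSp r).headI (pvSplitSp r).tail
          by_cases hacc : acc = []
          · subst hacc; simp [hcc]
          · have hcond : ¬ (acc = [] ∨
                pvR ((c :: (pvSplitSp r).headI) :: (pvSplitSp r).tail) = []) := by
              rw [hcc]; simp [hacc]
            rw [if_neg hcond, hcc]
            simp [hacc]
      · intro acc hacc
        by_cases hc : c = ' '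
        · subst hc
          rw [List.foldl_cons]
          have hstep : pvStep (acc, false) ' ' = (acc, true) := by simp [pvStep]
          rw [hstep, ih1 acc]
          by_cases hR : pvR (pvSplitSp r) = []
          · simp [pvSplitSp, hacc, hR]
          · simp [pvSplitSp, hacc, hR]
        · rw [List.foldl_cons]
          have hstep : pvStep (acc, false) c = (acc ++ [c], false) := by
            simp [pvStep, hc]
          rw [hstep, ih2 _ (by simp)]
          have hsp : pvSplitSp (c :: r)
              = (c :: (pvSplitSp r).headI) :: (pvSplitSp r).tail := by
            simp [pvSplitSp, hc]
          rw [hsp]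
          simp

-- splitOn.go with sep = [' '] computes pvSplitSp
lemma pvGo_eq (fuel : Nat) : ∀ (l cur : List Char) (acc : List (List Char)),
    l.length ≤ fuel →
    PySem.Chars.splitOn.go [' '] fuel l cur acc
      = acc.reverse ++ ((cur.reverse ++ (pvSplitSp l).headI) :: (pvSplitSp l).tail) := by
  induction fuel with
  | zero =>
      intro l cur acc hl
      have : l = [] := List.eq_nil_of_length_eq_zero (Nat.le_zero.mp hl)
      subst this
      rw [PySem.Chars.splitOn.go.eq_def]
      simp [pvSplitSp]
  | succ f ih =>
      intro l cur acc hl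
      cases l with
      | nil =>
          rw [PySem.Chars.splitOn.go.eq_def]
          simp [pvSplitSp]
      | cons c rest =>
          rw [PySem.Chars.splitOn.go.eq_def]
          simp only []
          by_cases hc : c = ' '
          · subst hc
            have hpre : [' '].isPrefixOf (' ' :: rest) = true := by
              simp [List.isPrefixOf]
            simp only [hpre, if_pos, List.length_cons, List.length_nil, List.drop_succ_cons,
              List.drop_zero]
            rw [ih rest [] (cur.reverse :: acc) (by simpa using hl)]
            rcases hsr : pvSplitSp rest with _ | ⟨w, ws⟩
            · exact absurd hsr (pvSplitSp_ne_nil rest)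
            · simp [pvSplitSp, hsr]
          · have hpre : [' '].isPrefixOf (c :: rest) = false := by
              simp only [List.isPrefixOf, Bool.and_true]
              exact beq_eq_false_iff_ne.mpr (fun h => hc (Eq.symm h))
            rw [hpre]
            rw [if_neg (by simp)]
            rw [ih rest (c :: cur) acc (by simpa using hl)]
            simp [pvSplitSp, hc]

lemma pvSplitOn_eq (l : List Char) : PySem.Chars.splitOn l [' '] = pvSplitSp l := by
  unfold PySem.Chars.splitOn
  rw [pvGo_eq (l.length + 1) l [] [] (by omega)]
  have := pvSplitSp_ne_nil l
  rcases h : pvSplitSp l with _ | ⟨w, ws⟩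
  · exact absurd h this
  · simp

-- ===== VERDICT (by name: the statement is the Claim_ definition above) =====
theorem person_name_formatter_spec : Claim_equal_person_name_formatter := by
  intro text _
  unfold Spec_person_name_formatter person_name_formatter person_name_formatter_alt
  set t := PySem.Chars.strip text.toList with ht
  by_cases h0 : t = []
  · simp [h0]
  · have hlen : ¬ t.length = 0 := by simpa using h0
    rw [if_neg hlen, if_neg h0]
    have hsplit : PySem.Chars.split? (PySem.Chars.lower t) [' ']
        = some (pvSplitSp (PySem.Chars.lower t)) := by
      rw [PySem.Chars.split?]
      simp [pvSplitOn_eq]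
    rw [hsplit]
    have hm := (pvMachine (PySem.Chars.lower t)).1 []
    rw [hm]
    simp [pvR]
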